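-- pv_equiv track=rewrite | github.com/foxn2000/zero_one_instruction | auto_run.py | powers_of_two_split
-- ===== SOURCE A (Python) =====
-- import math
--
-- def powers_of_two_split(n: int):
--     """GPU枚数nを 2の冪 の和に分割する (例:7→[4,2,1], 6→[4,2], 5→[4,1])"""
--     splits = []
--     remain = n
--     while remain > 0:
--         p = 2 ** int(math.floor(math.log2(remain)))
--         splits.append(p)
--         remain -= p
--     return splits
-- ===== SOURCE B (Python) =====
-- def powers_of_two_split(n: int):
--     """GPU枚数nを 2の冪 の和に分割する (例:7→[4,2,1], 6→[4,2], 5→[4,1])"""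
--     if n <= 0:
--         return []
--     return [1 << i for i in range(n.bit_length() - 1, -1, -1) if (n >> i) & 1]
-- ===== Notes on version B (the rewrite author's own statement) =====
-- stated objective: idiomatic
-- what changed: Replace the repeated float math.log2 + subtract-the-max loop by a single exact high-to-low scan over the bit positions of n, emitting the corresponding power of two for each set bit.
import Mathlib
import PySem

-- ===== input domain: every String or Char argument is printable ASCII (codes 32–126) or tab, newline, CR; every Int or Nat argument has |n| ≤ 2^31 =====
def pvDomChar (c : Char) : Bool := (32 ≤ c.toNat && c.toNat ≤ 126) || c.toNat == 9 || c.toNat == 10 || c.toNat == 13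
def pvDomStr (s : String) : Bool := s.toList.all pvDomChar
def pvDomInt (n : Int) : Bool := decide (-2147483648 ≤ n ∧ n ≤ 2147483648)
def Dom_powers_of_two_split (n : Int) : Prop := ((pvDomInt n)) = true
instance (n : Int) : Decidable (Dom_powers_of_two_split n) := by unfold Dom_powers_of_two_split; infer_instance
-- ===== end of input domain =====

-- B replaces A's repeated float-log2 + subtract-the-max loop by one exact
-- high-to-low scan over the bit positions of n (same return value; idiomatic).

-- ===== PORT A =====
-- A's while-loop over `remain`; `int(math.floor(math.log2(remain)))` is ported as the
-- exact integer log `Nat.log 2`, which agrees with the float computation for every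
-- remain ≤ 2^31 (well inside float's 53-bit exactness), i.e. on all of Dom.
def powersOfTwoSplitLoopA (remain : Nat) : List Int :=
  if _h : 0 < remain then
    let p : Nat := 2 ^ Nat.log 2 remain
    (p : Int) :: powersOfTwoSplitLoopA (remain - p)
  else []
  termination_by remain
  decreasing_by
    have hp : 1 ≤ 2 ^ Nat.log 2 remain := Nat.one_le_two_pow
    omega

def powers_of_two_split (n : Int) : List Int :=
  -- `remain = n`; the loop only runs while remain > 0, so it acts on n.toNat
  powersOfTwoSplitLoopA n.toNat

-- ===== PORT B =====
-- [1 << i for i in range(n.bit_length()-1, -1, -1) if (n >> i) & 1], for n > 0;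
-- range(bl-1,-1,-1) is ported as (List.range bl).reverse, n.bit_length() as Nat.size.
def powers_of_two_split_alt (n : Int) : List Int :=
  if n ≤ 0 then []
  else
    let m := n.toNat
    ((List.range m.size).reverse.filter (fun i => (m >>> i) &&& 1 == 1)).map
      (fun i => ((2 : Int) ^ i))

-- ===== PRECONDITION & SPEC =====
def Spec_powers_of_two_split (n : Int) (out : List Int) : Prop := out = powers_of_two_split_alt n
instance (n : Int) (out : List Int) : Decidable (Spec_powers_of_two_split n out) := by unfold Spec_powers_of_two_split; infer_instance

-- ===== CLAIM (what is proved, stated in full; the proofs are below) =====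
def Claim_equal_powers_of_two_split : Prop := ∀ (n : Int), Dom_powers_of_two_split n → Spec_powers_of_two_split n (powers_of_two_split n)

-- ===== LEMMAS AND PROOFS =====

-- B's bit test is Nat.testBit
theorem pv_bit_test (m i : Nat) : ((m >>> i) &&& 1 == 1) = m.testBit i := by
  simp [Nat.testBit, Nat.and_one_is_mod, Nat.one_and_eq_mod_two]

-- widening the scanned bit range past r.size changes nothing (those bits are 0)
theorem pv_filter_stable (r : Nat) {a b : Nat} (hra : r < 2 ^ a) (hab : a ≤ b) :
    (List.range b).reverse.filter r.testBit = (List.range a).reverse.filter r.testBit := by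
  induction b, hab using Nat.le_induction with
  | base => rfl
  | succ b hab ih =>
    rw [List.range_succ, List.reverse_append, List.filter_append]
    have hb : r.testBit b = false :=
      Nat.testBit_lt_two_pow (lt_of_lt_of_le hra (Nat.pow_le_pow_right (by norm_num) hab))
    simp [hb, ih]

-- the canonical value: descending powers of two at the set bits of m
def pvBits (m : Nat) : List Int :=
  ((List.range m.size).reverse.filter m.testBit).map (fun i => ((2 : Int) ^ i))

theorem pv_loopA_eq_bits (m : Nat) : powersOfTwoSplitLoopA m = pvBits m := by
  induction m using Nat.strong_induction_on with
  | _ m ih =>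
    rw [powersOfTwoSplitLoopA.eq_def]
    by_cases hm : 0 < m
    · simp only [hm, dif_pos]
      set k := Nat.log 2 m with hk
      have h1 : 2 ^ k ≤ m := Nat.pow_log_le_self 2 (by omega)
      have h2 : m < 2 ^ (k + 1) := Nat.lt_pow_succ_log_self (by norm_num) m
      set r := m - 2 ^ k with hr
      have hmr : m = 2 ^ k + r := by omega
      have hrk : r < 2 ^ k := by omega
      have hp1 : 1 ≤ 2 ^ k := Nat.one_le_two_pow
      -- m.size = k + 1
      have hsle : m.size ≤ k + 1 := Nat.size_le.mpr h2
      have hslt : k < m.size :=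
        (Nat.pow_lt_pow_iff_right (by norm_num)).mp (lt_of_le_of_lt h1 (Nat.lt_size_self m))
      have hsize : m.size = k + 1 := by omega
      -- head bit is set
      have htop : m.testBit k = true := by
        rw [hmr, Nat.testBit_two_pow_add_eq, Nat.testBit_lt_two_pow hrk]; rfl
      -- low bits of m are the bits of r
      have hlow : ∀ i ∈ (List.range k).reverse, m.testBit i = r.testBit i := by
        intro i hi
        rw [List.mem_reverse, List.mem_range] at hi
        rw [hmr, Nat.testBit_two_pow_add_gt hi]
      have hrsize : r.size ≤ k := Nat.size_le.mpr hrk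
      have hrlt : r < 2 ^ r.size := Nat.lt_size_self r
      rw [ih r (by omega)]
      unfold pvBits
      rw [hsize, List.range_succ, List.reverse_append, List.filter_append]
      simp only [List.reverse_singleton, List.filter_cons, htop]
      rw [List.filter_congr hlow, pv_filter_stable r hrlt hrsize]
      simp [hmr]
    · simp only [hm, dif_neg, not_false_iff]
      have : m = 0 := by omega
      subst this
      simp [pvBits, Nat.size_zero]

theorem powers_of_two_split_eq (n : Int) :
    powers_of_two_split n = powers_of_two_split_alt n := by
  unfold powers_of_two_split powers_of_two_split_alt
  by_cases hn : n ≤ 0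
  · have : n.toNat = 0 := Int.toNat_of_nonpos hn
    rw [this, powersOfTwoSplitLoopA.eq_def]
    simp [hn]
  · simp only [hn, if_neg, not_false_iff]
    rw [pv_loopA_eq_bits]
    unfold pvBits
    congr 1
    apply List.filter_congr
    intro i _
    rw [pv_bit_test]

-- ===== VERDICT (by name: the statement is the Claim_ definition above) =====
theorem powers_of_two_split_spec : Claim_equal_powers_of_two_split := by
  intro n _
  unfold Spec_powers_of_two_split
  exact powers_of_two_split_eq n
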